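-- pv_equiv track=rewrite | github.com/rkorv/tglang2 | src/scripts/analyse.py | calc_accuracy_per_file_length
-- ===== SOURCE A (Python) =====
-- def calc_accuracy_per_file_length(pred, gt, filelen, intervals):
--     interval_accuracies = {}
--     for interval in intervals:
--         relevant_ids = [i for i, l in enumerate(filelen) if l <= interval]
--         if len(relevant_ids) == 0:
--             interval_accuracies[interval] = (0, 0)
--             continue
--         relevant_pred = [pred[i] for i in relevant_ids]
--         relevant_gt = [gt[i] for i in relevant_ids]
--         correct = sum(1 for i in range(len(relevant_pred)) if relevant_pred[i] == relevant_gt[i])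
--         interval_accuracies[interval] = (correct, len(relevant_pred))
--     return interval_accuracies
-- ===== SOURCE B (Python) =====
-- def calc_accuracy_per_file_length(pred, gt, filelen, intervals):
--     # sort (length, correctness) pairs once, prefix-sum correctness, then answer
--     # each interval with a binary search: O((n+k) log n) instead of O(n*k)
--     pairs = sorted(((l, 1 if p == g else 0) for l, p, g in zip(filelen, pred, gt)),
--                    key=lambda x: x[0])
--     prefix = [0]
--     s = 0
--     for _, ok in pairs:
--         s += ok
--         prefix.append(s)
--     out = {}
--     for t in intervals:
--         lo, hi = 0, len(pairs)
--         while lo < hi: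
--             mid = (lo + hi) // 2
--             if pairs[mid][0] <= t:
--                 lo = mid + 1
--             else:
--                 hi = mid
--         out[t] = (prefix[lo], lo)
--     return out
-- ===== Notes on version B (the rewrite author's own statement) =====
-- stated objective: faster
-- what changed: B sorts the (filelen, correctness) pairs once, prefix-sums the correctness flags, and answers each interval with a binary search, instead of A's per-interval rescan of all files.
import Mathlib
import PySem

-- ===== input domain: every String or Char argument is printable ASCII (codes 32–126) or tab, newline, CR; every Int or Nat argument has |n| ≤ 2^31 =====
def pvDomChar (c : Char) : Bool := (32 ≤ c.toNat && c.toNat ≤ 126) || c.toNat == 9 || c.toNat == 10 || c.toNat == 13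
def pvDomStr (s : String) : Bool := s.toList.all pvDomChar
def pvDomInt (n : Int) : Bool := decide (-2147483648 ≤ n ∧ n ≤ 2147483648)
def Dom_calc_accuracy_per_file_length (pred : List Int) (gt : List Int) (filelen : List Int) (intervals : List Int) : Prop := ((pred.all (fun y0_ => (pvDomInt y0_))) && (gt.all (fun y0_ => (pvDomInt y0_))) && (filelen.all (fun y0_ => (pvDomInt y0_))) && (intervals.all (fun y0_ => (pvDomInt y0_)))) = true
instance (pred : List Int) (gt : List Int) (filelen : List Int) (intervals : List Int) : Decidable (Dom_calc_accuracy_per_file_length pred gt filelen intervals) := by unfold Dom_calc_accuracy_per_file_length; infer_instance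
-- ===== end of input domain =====

-- B replaces A's per-interval rescan by sort + prefix sums + binary search (measurably faster); equivalence is proved on Pre_, the inputs where A does not raise.

-- ===== PORT A =====
-- loop body of A's 'for interval in intervals' (pyGetD is pred[i]/gt[i]; Pre_ keeps those indices in range)
def pvABody (pred gt filelen : List Int) (d : PySem.Dict Int (Int × Int)) (interval : Int) : PySem.Dict Int (Int × Int) :=
  let relevant_ids : List Int :=
    ((PySem.List.enumerate filelen 0).filter (fun il => decide (il.2 ≤ interval))).map (fun il => il.1)
  if relevant_ids.length = 0 then d.insert interval (0, 0)
  else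
    let relevant_pred := relevant_ids.map (fun i => PySem.List.pyGetD pred i 0)
    let relevant_gt := relevant_ids.map (fun i => PySem.List.pyGetD gt i 0)
    let correct : Int :=
      ((PySem.List.pyRange 0 (relevant_pred.length : Int) 1).map
        (fun i => if PySem.List.pyGetD relevant_pred i 0 = PySem.List.pyGetD relevant_gt i 0 then (1 : Int) else 0)).sum
    d.insert interval (correct, (relevant_pred.length : Int))

def calc_accuracy_per_file_length (pred : List Int) (gt : List Int) (filelen : List Int) (intervals : List Int) : List (Int × Int × Int) :=
  (intervals.foldl (pvABody pred gt filelen) PySem.Dict.empty).items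

-- ===== PORT B =====
-- B's 'while lo < hi' binary-search loop (pairs[mid] is always in range when lo < hi ≤ len; getD is exact
-- there); the fuel argument hi - lo only makes the recursion structural — it never runs out before lo = hi
def pvBsearchGo (pairs : List (Int × Int)) (t : Int) : Nat → Nat → Nat → Nat
  | lo, _, 0 => lo
  | lo, hi, fuel + 1 =>
    if lo < hi then
      if (pairs.getD ((lo + hi) / 2) (0, 0)).1 ≤ t then
        pvBsearchGo pairs t ((lo + hi) / 2 + 1) hi fuel
      else
        pvBsearchGo pairs t lo ((lo + hi) / 2) fuel
    else lo

def pvBsearch (pairs : List (Int × Int)) (t : Int) (lo hi : Nat) : Nat :=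
  pvBsearchGo pairs t lo hi (hi - lo)

-- loop body of B's 'for t in intervals'
def pvBBody (pairs : List (Int × Int)) (pfx : List Int) (d : PySem.Dict Int (Int × Int)) (t : Int) : PySem.Dict Int (Int × Int) :=
  let lo := pvBsearch pairs t 0 pairs.length
  d.insert t (PySem.List.pyGetD pfx (lo : Int) 0, (lo : Int))

def calc_accuracy_per_file_length_alt (pred : List Int) (gt : List Int) (filelen : List Int) (intervals : List Int) : List (Int × Int × Int) :=
  let pairs := PySem.List.sorted
      ((filelen.zip (pred.zip gt)).map (fun x => (x.1, if x.2.1 = x.2.2 then (1 : Int) else 0)))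
      (fun x => x.1)
  let pr := pairs.foldl (fun st p => (st.1 ++ [st.2 + p.2], st.2 + p.2)) (([(0 : Int)], (0 : Int)))
  let pfx := pr.1
  (intervals.foldl (pvBBody pairs pfx) PySem.Dict.empty).items

-- ===== PRECONDITION & SPEC =====
-- Pre_ admits exactly the inputs where A returns: every file index whose length falls under some
-- interval must be a valid index into pred and gt (otherwise A raises IndexError).
def Pre_calc_accuracy_per_file_length (pred : List Int) (gt : List Int) (filelen : List Int) (intervals : List Int) : Prop :=
  ∀ i : Nat, i < filelen.length → (∃ t ∈ intervals, filelen.getD i 0 ≤ t) → i < pred.length ∧ i < gt.length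
instance (pred : List Int) (gt : List Int) (filelen : List Int) (intervals : List Int) : Decidable (Pre_calc_accuracy_per_file_length pred gt filelen intervals) := by unfold Pre_calc_accuracy_per_file_length; infer_instance

def pvWitness_calc_accuracy_per_file_length : List Int × List Int × List Int × List Int :=
  ([1, 2], [1, 3], [5, 10], [7, 20])

def Spec_calc_accuracy_per_file_length (pred : List Int) (gt : List Int) (filelen : List Int) (intervals : List Int) (out : List (Int × Int × Int)) : Prop := out = calc_accuracy_per_file_length_alt pred gt filelen intervals
instance (pred : List Int) (gt : List Int) (filelen : List Int) (intervals : List Int) (out : List (Int × Int × Int)) : Decidable (Spec_calc_accuracy_per_file_length pred gt filelen intervals out) := by unfold Spec_calc_accuracy_per_file_length; infer_instance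

-- ===== CLAIM (what is proved, stated in full; the proofs are below) =====
def Claim_equal_calc_accuracy_per_file_length : Prop := ∀ (pred : List Int) (gt : List Int) (filelen : List Int) (intervals : List Int), Dom_calc_accuracy_per_file_length pred gt filelen intervals → Pre_calc_accuracy_per_file_length pred gt filelen intervals → Spec_calc_accuracy_per_file_length pred gt filelen intervals (calc_accuracy_per_file_length pred gt filelen intervals)

-- ===== LEMMAS AND PROOFS =====

-- the multiset both programs count over: (file length, 1 if prediction correct else 0)
def pvPs (pred gt filelen : List Int) : List (Int × Int) :=
  (filelen.zip (pred.zip gt)).map (fun x => (x.1, if x.2.1 = x.2.2 then (1 : Int) else 0))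

-- number of correct predictions among files of length ≤ t, and their total count
def pvC (ps : List (Int × Int)) (t : Int) : Int :=
  ((ps.filter (fun p => decide (p.1 ≤ t))).map (fun p => p.2)).sum
def pvT (ps : List (Int × Int)) (t : Int) : Int :=
  (ps.countP (fun p => decide (p.1 ≤ t)) : Int)

lemma pvMap2 (f g : Int → Int) :
    ∀ rel : List Int,
      (List.range rel.length).map
          (fun k => if (rel.map f).getD k 0 = (rel.map g).getD k 0 then (1 : Int) else 0)
        = rel.map (fun r => if f r = g r then (1 : Int) else 0) := by
  intro rel
  induction rel with
  | nil => simp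
  | cons r rel ih =>
    simp only [List.length_cons, List.range_succ_eq_map, List.map_cons, List.map_map]
    refine congrArg₂ List.cons (by simp) ?_
    rw [← ih]
    apply List.map_congr_left
    intro k hk
    simp

lemma pvEnumZip (t : Int) (F : Int → Int → Int) (PR GR : List Int) :
    ∀ (fl : List Int) (s : Nat),
      (∀ k : Nat, k < fl.length → fl.getD k 0 ≤ t → s + k < PR.length ∧ s + k < GR.length) →
      ((PySem.List.enumerate fl (s : Int)).filter (fun il => decide (il.2 ≤ t))).map
          (fun il => F (PySem.List.pyGetD PR il.1 0) (PySem.List.pyGetD GR il.1 0))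
        = ((fl.zip ((PR.drop s).zip (GR.drop s))).filter (fun x => decide (x.1 ≤ t))).map
            (fun x => F x.2.1 x.2.2) := by
  intro fl
  induction fl with
  | nil => intro s h; simp [PySem.List.enumerate]
  | cons l fl ih =>
    intro s hpre
    have hpre' : ∀ k : Nat, k < fl.length → fl.getD k 0 ≤ t →
        (s + 1) + k < PR.length ∧ (s + 1) + k < GR.length := by
      intro k hk hle
      have h := hpre (k + 1) (by simp; omega) (by simpa using hle)
      omega
    have hrec := ih (s + 1) hpre'
    push_cast at hrec
    rw [PySem.List.enumerate_cons]
    by_cases hl : l ≤ t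
    · have hk0 := hpre 0 (by simp) (by simpa using hl)
      have hp : s < PR.length := by omega
      have hg : s < GR.length := by omega
      have hPR : PR.drop s = PR[s] :: PR.drop (s + 1) := List.drop_eq_getElem_cons hp
      have hGR : GR.drop s = GR[s] :: GR.drop (s + 1) := List.drop_eq_getElem_cons hg
      have e1 : PySem.List.pyGetD PR ((s : Nat) : Int) 0 = PR[s] := by
        rw [PySem.List.pyGetD_natCast]; exact List.getD_eq_getElem PR 0 hp
      have e2 : PySem.List.pyGetD GR ((s : Nat) : Int) 0 = GR[s] := by
        rw [PySem.List.pyGetD_natCast]; exact List.getD_eq_getElem GR 0 hg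
      rw [hPR, hGR]
      simp only [List.zip_cons_cons]
      rw [List.filter_cons_of_pos (by simpa using hl),
          List.filter_cons_of_pos (by simpa using hl)]
      simp only [List.map_cons]
      rw [e1, e2, hrec]
    · rw [List.filter_cons_of_neg (by simpa using hl), hrec]
      rcases hPRs : PR.drop s with _ | ⟨a, pr'⟩
      · have h1 : PR.drop (s + 1) = [] := by rw [← List.tail_drop, hPRs]; rfl
        simp [h1]
      · rcases hGRs : GR.drop s with _ | ⟨b, gr'⟩
        · have h2 : GR.drop (s + 1) = [] := by rw [← List.tail_drop, hGRs]; rfl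
          simp [h2]
        · have h1 : PR.drop (s + 1) = pr' := by rw [← List.tail_drop, hPRs]; rfl
          have h2 : GR.drop (s + 1) = gr' := by rw [← List.tail_drop, hGRs]; rfl
          rw [h1, h2]
          simp only [List.zip_cons_cons]
          rw [List.filter_cons_of_neg (by simp [hl])]

lemma pvFilterTake (qs : List (Int × Int)) (t : Int) (r : Nat) (hr : r ≤ qs.length)
    (h1 : ∀ j (hj : j < qs.length), j < r → qs[j].1 ≤ t)
    (h2 : ∀ j (hj : j < qs.length), r ≤ j → t < qs[j].1) :
    qs.filter (fun p => decide (p.1 ≤ t)) = qs.take r := by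
  have ht : (qs.take r).filter (fun p => decide (p.1 ≤ t)) = qs.take r := by
    rw [List.filter_eq_self]
    intro a ha
    obtain ⟨i, hi, hia⟩ := List.mem_iff_getElem.1 ha
    have hi' : i < r ∧ i < qs.length := by simpa [List.length_take] using hi
    rw [List.getElem_take] at hia
    subst hia
    simpa using h1 i hi'.2 hi'.1
  have hd : (qs.drop r).filter (fun p => decide (p.1 ≤ t)) = [] := by
    rw [List.filter_eq_nil_iff]
    intro a ha
    obtain ⟨i, hi, hia⟩ := List.mem_iff_getElem.1 ha
    have hi' : i < qs.length - r := by simpa [List.length_drop] using hi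
    have hil : r + i < qs.length := by omega
    rw [List.getElem_drop] at hia
    subst hia
    have := h2 (r + i) hil (by omega)
    simpa using not_le.2 this
  conv_lhs => rw [← List.take_append_drop r qs]
  rw [List.filter_append, ht, hd, List.append_nil]

lemma pvBsearch_char (Q : List (Int × Int)) (t : Int)
    (hmono : ∀ (p q : Nat) (hpq : p ≤ q) (hq : q < Q.length),
      (Q[p]'(Nat.lt_of_le_of_lt hpq hq)).1 ≤ Q[q].1) :
    ∀ (n lo hi : Nat), hi - lo ≤ n → lo ≤ hi → hi ≤ Q.length →
      (∀ j (hj : j < Q.length), j < lo → Q[j].1 ≤ t) →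
      (∀ j (hj : j < Q.length), hi ≤ j → t < Q[j].1) →
      pvBsearchGo Q t lo hi n ≤ Q.length ∧
        (∀ j (hj : j < Q.length), j < pvBsearchGo Q t lo hi n → Q[j].1 ≤ t) ∧
        (∀ j (hj : j < Q.length), pvBsearchGo Q t lo hi n ≤ j → t < Q[j].1) := by
  intro n
  induction n with
  | zero =>
    intro lo hi hn hlh hhi h1 h2
    simp only [pvBsearchGo]
    exact ⟨by omega, fun j hj hlt => h1 j hj hlt, fun j hj hge => h2 j hj (by omega)⟩
  | succ n ih =>
    intro lo hi hn hlh hhi h1 h2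
    simp only [pvBsearchGo]
    by_cases hcond : lo < hi
    · rw [if_pos hcond]
      have hmidlt : (lo + hi) / 2 < Q.length := by omega
      have hgd : Q.getD ((lo + hi) / 2) (0, 0) = Q[(lo + hi) / 2] :=
        List.getD_eq_getElem Q (0, 0) hmidlt
      by_cases hc : (Q.getD ((lo + hi) / 2) (0, 0)).1 ≤ t
      · rw [if_pos hc]
        refine ih ((lo + hi) / 2 + 1) hi (by omega) (by omega) hhi ?_ h2
        intro j hj hjlt
        have hQj : Q[j].1 ≤ Q[(lo + hi) / 2].1 := hmono j ((lo + hi) / 2) (by omega) hmidlt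
        rw [hgd] at hc
        exact le_trans hQj hc
      · rw [if_neg hc]
        refine ih lo ((lo + hi) / 2) (by omega) (by omega) (by omega) h1 ?_
        intro j hj hge
        rw [hgd] at hc
        have := hmono ((lo + hi) / 2) j hge hj
        omega
    · rw [if_neg hcond]
      exact ⟨by omega, h1, fun j hj hge => h2 j hj (by omega)⟩

lemma pvMonoOfSorted (ps : List (Int × Int)) :
    ∀ (p q : Nat) (hpq : p ≤ q) (hq : q < (PySem.List.sorted ps (fun x => x.1)).length),
      ((PySem.List.sorted ps (fun x => x.1))[p]'(Nat.lt_of_le_of_lt hpq hq)).1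
        ≤ (PySem.List.sorted ps (fun x => x.1))[q].1 :=
  fun _ _ hpq hq => PySem.List.key_sorted_getElem_mono ps (fun x => x.1) hpq hq

lemma pvPrefix :
    ∀ (qs : List (Int × Int)) (acc : List Int) (s : Int),
      (qs.foldl (fun st p => (st.1 ++ [st.2 + p.2], st.2 + p.2)) (acc ++ [s], s)).1
        = acc ++ (List.range (qs.length + 1)).map (fun j => s + ((qs.take j).map (fun p => p.2)).sum) := by
  intro qs
  induction qs with
  | nil => intro acc s; simp
  | cons p qs ih =>
    intro acc s
    simp only [List.foldl_cons]
    have h := ih (acc ++ [s]) (s + p.2)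
    rw [h, List.append_assoc]
    congr 1
    simp [List.range_succ_eq_map, List.map_map, Function.comp, List.take_succ_cons, add_assoc]

lemma pvAVal (pred gt filelen : List Int) (t : Int) (d : PySem.Dict Int (Int × Int))
    (hpre : ∀ k : Nat, k < filelen.length → filelen.getD k 0 ≤ t → k < pred.length ∧ k < gt.length) :
    pvABody pred gt filelen d t
      = d.insert t (pvC (pvPs pred gt filelen) t, pvT (pvPs pred gt filelen) t) := by
  simp only [pvABody]
  set rel := ((PySem.List.enumerate filelen 0).filter (fun il => decide (il.2 ≤ t))).map (fun il => il.1) with hrel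
  have hmain := pvEnumZip t (fun a b => if a = b then (1 : Int) else 0) pred gt filelen 0
      (by intro k hk hle; have := hpre k hk hle; omega)
  simp only [Nat.cast_zero, List.drop_zero] at hmain
  set Z := (filelen.zip (pred.zip gt)).filter (fun x => decide (x.1 ≤ t)) with hZdef
  have hlen : rel.length = Z.length := by
    have h := congrArg List.length hmain
    simp only [List.length_map] at h
    rw [hrel, List.length_map]
    exact h
  have hps : (pvPs pred gt filelen).filter (fun p => decide (p.1 ≤ t))
      = Z.map (fun x => (x.1, if x.2.1 = x.2.2 then (1 : Int) else 0)) := by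
    rw [pvPs, List.filter_map, hZdef]
    exact congrArg _ (List.filter_congr (by intro x hx; simp [Function.comp]))
  have hT : pvT (pvPs pred gt filelen) t = (rel.length : Int) := by
    rw [pvT, List.countP_eq_length_filter, hps, List.length_map, hlen]
  have hC : pvC (pvPs pred gt filelen) t
      = (Z.map (fun x => if x.2.1 = x.2.2 then (1 : Int) else 0)).sum := by
    rw [pvC, hps, List.map_map]
    congr 1
  by_cases h0 : rel.length = 0
  · rw [if_pos h0]
    have hZnil : Z = [] := List.eq_nil_of_length_eq_zero (by omega)
    rw [hC, hT, hZnil, h0]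
    simp
  · rw [if_neg h0]
    have hcorrect :
        ((PySem.List.pyRange 0 (((rel.map (fun i => PySem.List.pyGetD pred i 0)).length : Nat) : Int) 1).map
          (fun i => if PySem.List.pyGetD (rel.map (fun i => PySem.List.pyGetD pred i 0)) i 0
              = PySem.List.pyGetD (rel.map (fun i => PySem.List.pyGetD gt i 0)) i 0 then (1 : Int) else 0)).sum
        = (Z.map (fun x => if x.2.1 = x.2.2 then (1 : Int) else 0)).sum := by
      rw [List.length_map, PySem.List.pyRange_zero_natCast, List.map_map]
      simp only [Function.comp_def, PySem.List.pyGetD_natCast]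
      rw [pvMap2 (fun i => PySem.List.pyGetD pred i 0) (fun i => PySem.List.pyGetD gt i 0) rel]
      rw [hrel, List.map_map]
      simp only [Function.comp_def]
      rw [hmain]
    rw [hC, hT, hcorrect, List.length_map]

lemma pvBVal (ps : List (Int × Int)) (t : Int) (d : PySem.Dict Int (Int × Int)) :
    pvBBody (PySem.List.sorted ps (fun x => x.1))
        ((PySem.List.sorted ps (fun x => x.1)).foldl
          (fun st p => (st.1 ++ [st.2 + p.2], st.2 + p.2)) (([(0 : Int)], (0 : Int)))).1 d t
      = d.insert t (pvC ps t, pvT ps t) := by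
  obtain ⟨hle, h1, h2⟩ := pvBsearch_char (PySem.List.sorted ps (fun x => x.1)) t (pvMonoOfSorted ps)
    ((PySem.List.sorted ps (fun x => x.1)).length - 0) 0 (PySem.List.sorted ps (fun x => x.1)).length
    (by omega) (Nat.zero_le _) le_rfl
    (by intro j hj hj0; omega)
    (by intro j hj hge; omega)
  simp only [pvBBody, pvBsearch]
  set lo := pvBsearchGo (PySem.List.sorted ps (fun x => x.1)) t 0 (PySem.List.sorted ps (fun x => x.1)).length ((PySem.List.sorted ps (fun x => x.1)).length - 0) with hlo
  have hft := pvFilterTake (PySem.List.sorted ps (fun x => x.1)) t lo hle h1 h2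
  have hperm : (PySem.List.sorted ps (fun x => x.1)).Perm ps := PySem.List.sorted_perm ps _ false
  have hcount : pvT ps t = (lo : Int) := by
    rw [pvT, ← List.Perm.countP_eq _ hperm, List.countP_eq_length_filter, hft, List.length_take,
      min_eq_left hle]
  have hpfx := pvPrefix (PySem.List.sorted ps (fun x => x.1)) [] 0
  simp only [List.nil_append] at hpfx
  have hsum : PySem.List.pyGetD
      ((PySem.List.sorted ps (fun x => x.1)).foldl
        (fun st p => (st.1 ++ [st.2 + p.2], st.2 + p.2)) (([(0 : Int)], (0 : Int)))).1 (lo : Int) 0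
      = pvC ps t := by
    rw [hpfx, PySem.List.pyGetD_natCast,
      List.getD_eq_getElem _ 0 (by simp only [List.length_map, List.length_range]; omega),
      List.getElem_map, List.getElem_range, ← hft, pvC]
    have hpm := List.Perm.sum_eq (List.Perm.map (fun p : Int × Int => p.2)
      (List.Perm.filter (fun p : Int × Int => decide (p.1 ≤ t)) hperm))
    rw [← hpm]
    simp
  rw [hsum, hcount]

-- ===== VERDICT (by name: the statement is the Claim_ definition above) =====
theorem calc_accuracy_per_file_length_spec : Claim_equal_calc_accuracy_per_file_length := by
  intro pred gt filelen intervals _hdom hpre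
  unfold Spec_calc_accuracy_per_file_length
  simp only [calc_accuracy_per_file_length, calc_accuracy_per_file_length_alt]
  have hA : List.foldl (pvABody pred gt filelen) PySem.Dict.empty intervals
      = List.foldl (fun (d : PySem.Dict Int (Int × Int)) t =>
          d.insert t (pvC (pvPs pred gt filelen) t, pvT (pvPs pred gt filelen) t))
        PySem.Dict.empty intervals := by
    apply PySem.List.foldl_congr_mem
    intro d x hx
    apply pvAVal
    intro k hk hle
    exact hpre k hk ⟨x, hx, hle⟩
  have hB : List.foldl
        (pvBBody (PySem.List.sorted (pvPs pred gt filelen) (fun x => x.1))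
          ((PySem.List.sorted (pvPs pred gt filelen) (fun x => x.1)).foldl
            (fun st p => (st.1 ++ [st.2 + p.2], st.2 + p.2)) (([(0 : Int)], (0 : Int)))).1)
        PySem.Dict.empty intervals
      = List.foldl (fun (d : PySem.Dict Int (Int × Int)) t =>
          d.insert t (pvC (pvPs pred gt filelen) t, pvT (pvPs pred gt filelen) t))
        PySem.Dict.empty intervals := by
    apply PySem.List.foldl_congr_mem
    intro d x hx
    exact pvBVal (pvPs pred gt filelen) x d
  show (List.foldl (pvABody pred gt filelen) PySem.Dict.empty intervals).items
      = (List.foldl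
          (pvBBody (PySem.List.sorted (pvPs pred gt filelen) (fun x => x.1))
            ((PySem.List.sorted (pvPs pred gt filelen) (fun x => x.1)).foldl
              (fun st p => (st.1 ++ [st.2 + p.2], st.2 + p.2)) (([(0 : Int)], (0 : Int)))).1)
          PySem.Dict.empty intervals).items
  rw [hA, hB]
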